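-- pv_equiv track=rewrite | github.com/dic-case-studies/casa6 | casatasks/src/scripts/sdutil.py | convert_antenna_spec_autocorr
-- ===== SOURCE A (Python) =====
-- def convert_antenna_spec_autocorr(antenna):
--     """Convert antenna (baseline) specification(s) to include autocorr data.
--
--     Args:
--         antenna (str): antenna specification
--
--     Returns:
--         str: tweaked antenna specification
--     """
--     if len(antenna) == 0:
--         return antenna
--     elif antenna.find(';') >= 0:
--         # antenna selection is semi-colon separated list of baseline
--         # specifications: 'SEL1;SEL2...'
--         return ';'.join(map(convert_antenna_spec_autocorr, antenna.split(';')))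
--     elif antenna.find('&') < 0:
--         # no '&' in the selection string
--         #  -> 'ANT&&&'
--         return antenna + '&&&'
--     elif antenna.endswith('&&'):
--         # 'ANT&&' or 'ANT&&&'
--         #  -> as is
--         return antenna
--     elif antenna.endswith('&'):
--         # 'ANT&'
--         #  -> 'ANT&&&'
--         return antenna.strip('&') + '&&&'
--     else:
--         # 'ANT1&ANT2' or 'ANT1&&ANT2'
--         #  -> 'ANT1&&&;ANT2&&&'
--         specs = [a for a in antenna.split('&') if len(a) > 0]
--         return ';'.join(map(convert_antenna_spec_autocorr, specs))
-- ===== SOURCE B (Python) =====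
-- def convert_antenna_spec_autocorr(antenna):
--     """Convert antenna (baseline) specification(s) to include autocorr data.
--
--     Iterative version: split once on ';', transform each segment with no
--     recursion, join the results with ';'.
--     """
--     out = []
--     for seg in antenna.split(';'):
--         if len(seg) == 0:
--             out.append('')
--         elif seg.find('&') < 0:
--             out.append(seg + '&&&')
--         elif seg.endswith('&&'):
--             out.append(seg)
--         elif seg.endswith('&'):
--             out.append(seg.strip('&') + '&&&')
--         else:
--             out.append(';'.join(s + '&&&' for s in seg.split('&') if s))
--     return ';'.join(out)
-- ===== Notes on version B (the rewrite author's own statement) =====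
-- stated objective: simpler
-- what changed: Replaces A's self-recursive function (two recursive call sites through map) by a single non-recursive pass: split the input once on the semicolon separator, transform each segment with an inlined branch table, and join the results back.
import Mathlib
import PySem

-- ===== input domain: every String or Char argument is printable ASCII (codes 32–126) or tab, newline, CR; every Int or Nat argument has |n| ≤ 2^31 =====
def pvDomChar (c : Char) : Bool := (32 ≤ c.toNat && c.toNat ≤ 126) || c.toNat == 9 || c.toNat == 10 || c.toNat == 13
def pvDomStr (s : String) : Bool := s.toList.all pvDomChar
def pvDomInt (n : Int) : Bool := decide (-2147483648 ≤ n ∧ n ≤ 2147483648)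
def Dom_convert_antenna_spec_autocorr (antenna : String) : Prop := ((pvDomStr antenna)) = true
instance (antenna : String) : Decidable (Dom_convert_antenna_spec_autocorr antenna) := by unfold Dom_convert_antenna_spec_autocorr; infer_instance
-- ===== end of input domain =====

-- B replaces A's two-level recursion by one split on ';' with an inlined non-recursive
-- per-segment transform (objective: simpler, same cost).


-- ===== PORT A =====
-- helpers kept above the port because the port's termination proof cites them:
-- a reference recursion computing Python's s.split(c) for a one-char separator
def pvSplit1 (c : Char) : List Char → List (List Char)
  | [] => [[]]
  | x :: xs =>
    if x = c then [] :: pvSplit1 c xs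
    else match pvSplit1 c xs with
      | [] => [[x]]
      | p :: ps => (x :: p) :: ps

def pvMerge (pre : List Char) : List (List Char) → List (List Char)
  | [] => [pre]
  | p :: ps => (pre ++ p) :: ps

theorem pvSplit1_ne_nil (c : Char) (l : List Char) : pvSplit1 c l ≠ [] := by
  induction l with
  | nil => simp [pvSplit1]
  | cons x xs ih =>
    simp only [pvSplit1]
    split
    · simp
    · split <;> simp

theorem pvMerge_nil (ps : List (List Char)) (h : ps ≠ []) : pvMerge [] ps = ps := by
  cases ps with
  | nil => exact absurd rfl h
  | cons p ps' => simp [pvMerge]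

theorem pvSplit1_of_not_mem (c : Char) (l : List Char) (hc : c ∉ l) : pvSplit1 c l = [l] := by
  induction l with
  | nil => simp [pvSplit1]
  | cons x xs ih =>
    simp only [pvSplit1]
    rw [if_neg (by rintro rfl; exact hc (by simp))]
    rw [ih (fun h => hc (by simp [h]))]

-- Chars.splitOn for a one-char separator equals the reference recursion
theorem splitOn_go_eq (c : Char) (l cur : List Char) (acc : List (List Char)) (fuel : Nat)
    (hf : l.length ≤ fuel) :
    PySem.Chars.splitOn.go [c] fuel l cur acc = acc.reverse ++ pvMerge cur.reverse (pvSplit1 c l) := by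
  induction l generalizing cur acc fuel with
  | nil =>
    cases fuel with
    | zero => simp [PySem.Chars.splitOn.go, pvSplit1, pvMerge]
    | succ f => simp [PySem.Chars.splitOn.go, pvSplit1, pvMerge]
  | cons x xs ih =>
    cases fuel with
    | zero => simp at hf
    | succ f =>
      have hxs : xs.length ≤ f := by simpa using hf
      by_cases hx : x = c
      · subst hx
        have hpre : [x].isPrefixOf (x :: xs) = true := by simp [List.isPrefixOf]
        rw [PySem.Chars.splitOn.go, if_pos hpre]
        simp only [List.length_singleton, List.drop_one, List.tail_cons]
        rw [ih _ _ _ hxs]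
        simp only [pvSplit1, List.reverse_nil]
        rw [pvMerge_nil _ (pvSplit1_ne_nil x xs)]
        simp [pvMerge]
      · have hpre : [c].isPrefixOf (x :: xs) = false := by
          simp only [List.isPrefixOf, Bool.and_eq_false_iff]
          left
          simp [beq_eq_false_iff_ne]
          exact fun h => absurd h.symm hx
        rw [PySem.Chars.splitOn.go, if_neg (by simp [hpre])]
        rw [ih _ _ _ hxs]
        simp only [pvSplit1, if_neg hx]
        cases hps : pvSplit1 c xs with
        | nil => exact absurd hps (pvSplit1_ne_nil c xs)
        | cons p ps => simp [pvMerge]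

theorem splitOn_eq_pvSplit1 (c : Char) (l : List Char) :
    PySem.Chars.splitOn l [c] = pvSplit1 c l := by
  unfold PySem.Chars.splitOn
  rw [splitOn_go_eq c l [] [] (l.length + 1) (by omega)]
  simpa using pvMerge_nil _ (pvSplit1_ne_nil c l)

-- each split piece is strictly shorter than the whole when the separator occurs
theorem pvSplit1_length_lt (c : Char) (l : List Char) (hc : c ∈ l) :
    ∀ p ∈ pvSplit1 c l, p.length < l.length := by
  induction l with
  | nil => simp at hc
  | cons x xs ih =>
    intro p hp
    simp only [pvSplit1] at hp
    by_cases hx : x = c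
    · rw [if_pos hx] at hp
      rw [List.mem_cons] at hp
      rcases hp with hp | hp
      · simp [hp]
      · by_cases hcx : c ∈ xs
        · have := ih hcx p hp
          simp; omega
        · rw [pvSplit1_of_not_mem c xs hcx] at hp
          simp at hp
          simp [hp]
    · rw [if_neg hx] at hp
      have hcx : c ∈ xs := by
        rw [List.mem_cons] at hc
        rcases hc with h | h
        · exact absurd h.symm hx
        · exact h
      cases hps : pvSplit1 c xs with
      | nil => exact absurd hps (pvSplit1_ne_nil c xs)
      | cons q qs =>
        rw [hps, List.mem_cons] at hp
        rcases hp with hp | hp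
        · have := ih hcx q (by rw [hps]; simp)
          subst hp; simp; omega
        · have := ih hcx p (by rw [hps]; simp [hp])
          simp; omega

theorem splitOn_length_lt (c : Char) (l : List Char) (hc : c ∈ l) :
    ∀ p ∈ PySem.Chars.splitOn l [c], p.length < l.length := by
  rw [splitOn_eq_pvSplit1]; exact pvSplit1_length_lt c l hc

theorem mem_iff_infix_singleton (c : Char) (l : List Char) : ([c] <:+: l) ↔ c ∈ l := by
  constructor
  · rintro ⟨s, t, rfl⟩; simp
  · intro h
    obtain ⟨s, t, rfl⟩ := List.append_of_mem h
    exact ⟨s, t, by simp⟩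

-- literal transliteration of A (recursive), on code points
def pvA (l : List Char) : List Char :=
  if l.length = 0 then l
  else if 0 ≤ PySem.Chars.find l [';'] then
    PySem.Chars.join [';'] ((PySem.Chars.splitOn l [';']).attach.map (fun p => pvA p.val))
  else if PySem.Chars.find l ['&'] < 0 then l ++ ['&', '&', '&']
  else if PySem.Chars.endswith l ['&', '&'] then l
  else if PySem.Chars.endswith l ['&'] then PySem.Chars.stripChars l ['&'] ++ ['&', '&', '&']
  else
    PySem.Chars.join [';']
      (((PySem.Chars.splitOn l ['&']).filter (fun a => decide (0 < a.length))).attach.map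
        (fun p => pvA p.val))
termination_by l.length
decreasing_by
  · exact splitOn_length_lt ';' l
      ((mem_iff_infix_singleton ';' l).mp ((PySem.Chars.find_nonneg_iff l [';']).mp (by assumption)))
      p.val p.property
  · refine splitOn_length_lt '&' l ?_ p.val (List.mem_of_mem_filter p.property)
    have h0 : 0 ≤ PySem.Chars.find l ['&'] := by omega
    exact (mem_iff_infix_singleton '&' l).mp ((PySem.Chars.find_nonneg_iff l ['&']).mp h0)

def convert_antenna_spec_autocorr (antenna : String) : String :=
  String.ofList (pvA antenna.toList)

-- ===== PORT B =====
-- per-segment transform (no recursion), transliteration of Source B's loop body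
def pvSeg (s : List Char) : List Char :=
  if s.length = 0 then []
  else if PySem.Chars.find s ['&'] < 0 then s ++ ['&', '&', '&']
  else if PySem.Chars.endswith s ['&', '&'] then s
  else if PySem.Chars.endswith s ['&'] then PySem.Chars.stripChars s ['&'] ++ ['&', '&', '&']
  else
    PySem.Chars.join [';']
      (((PySem.Chars.splitOn s ['&']).filter (fun a => !a.isEmpty)).map (fun a => a ++ ['&', '&', '&']))

def convert_antenna_spec_autocorr_alt (antenna : String) : String :=
  String.ofList (PySem.Chars.join [';'] ((PySem.Chars.splitOn antenna.toList [';']).map pvSeg))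

-- ===== PRECONDITION & SPEC =====
def Spec_convert_antenna_spec_autocorr (antenna : String) (out : String) : Prop := out = convert_antenna_spec_autocorr_alt antenna
instance (antenna : String) (out : String) : Decidable (Spec_convert_antenna_spec_autocorr antenna out) := by unfold Spec_convert_antenna_spec_autocorr; infer_instance

-- ===== CLAIM (what is proved, stated in full; the proofs are below) =====
def Claim_equal_convert_antenna_spec_autocorr : Prop := ∀ (antenna : String), Dom_convert_antenna_spec_autocorr antenna → Spec_convert_antenna_spec_autocorr antenna (convert_antenna_spec_autocorr antenna)

-- ===== LEMMAS AND PROOFS =====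

-- split pieces never contain the separator
theorem pvSplit1_not_mem (c : Char) (l : List Char) : ∀ p ∈ pvSplit1 c l, c ∉ p := by
  induction l with
  | nil => simp [pvSplit1]
  | cons x xs ih =>
    intro p hp
    simp only [pvSplit1] at hp
    by_cases hx : x = c
    · rw [if_pos hx, List.mem_cons] at hp
      rcases hp with hp | hp
      · simp [hp]
      · exact ih p hp
    · rw [if_neg hx] at hp
      cases hps : pvSplit1 c xs with
      | nil => exact absurd hps (pvSplit1_ne_nil c xs)
      | cons q qs =>
        rw [hps, List.mem_cons] at hp
        rcases hp with hp | hp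
        · subst hp
          intro hmem
          rw [List.mem_cons] at hmem
          rcases hmem with h | h
          · exact hx h.symm
          · exact ih q (by rw [hps]; simp) h
        · exact ih p (by rw [hps]; simp [hp])

-- split pieces only use characters of the whole
theorem pvSplit1_subset (c : Char) (l : List Char) :
    ∀ p ∈ pvSplit1 c l, ∀ x ∈ p, x ∈ l := by
  induction l with
  | nil => simp [pvSplit1]
  | cons y ys ih =>
    intro p hp x hx
    simp only [pvSplit1] at hp
    by_cases hy : y = c
    · rw [if_pos hy, List.mem_cons] at hp
      rcases hp with hp | hp
      · simp [hp] at hx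
      · exact List.mem_cons_of_mem y (ih p hp x hx)
    · rw [if_neg hy] at hp
      cases hps : pvSplit1 c ys with
      | nil => exact absurd hps (pvSplit1_ne_nil c ys)
      | cons q qs =>
        rw [hps, List.mem_cons] at hp
        rcases hp with hp | hp
        · subst hp
          rw [List.mem_cons] at hx
          rcases hx with h | h
          · simp [h]
          · exact List.mem_cons_of_mem y (ih q (by rw [hps]; simp) x h)
        · exact List.mem_cons_of_mem y (ih p (by rw [hps]; simp [hp]) x hx)

theorem find_neg_of_not_mem (c : Char) (l : List Char) (h : c ∉ l) :
    PySem.Chars.find l [c] < 0 := by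
  have := (PySem.Chars.find_eq_neg_one_iff l [c]).mpr
    (fun hin => h ((mem_iff_infix_singleton c l).mp hin))
  omega

theorem find_nonneg_of_mem (c : Char) (l : List Char) (h : c ∈ l) :
    0 ≤ PySem.Chars.find l [c] :=
  (PySem.Chars.find_nonneg_iff l [c]).mpr ((mem_iff_infix_singleton c l).mpr h)

-- on a ';'-free string A's recursion agrees with B's inlined segment transform
theorem pvA_eq_pvSeg (l : List Char) (hl : ';' ∉ l) : pvA l = pvSeg l := by
  rw [pvA]
  by_cases h0 : l.length = 0
  · rw [if_pos h0]
    have : l = [] := List.eq_nil_of_length_eq_zero h0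
    subst this
    simp [pvSeg]
  · rw [if_neg h0]
    have hfind : ¬ 0 ≤ PySem.Chars.find l [';'] := by
      have := find_neg_of_not_mem ';' l hl; omega
    rw [if_neg hfind]
    unfold pvSeg
    rw [if_neg h0]
    by_cases hamp : PySem.Chars.find l ['&'] < 0
    · rw [if_pos hamp, if_pos hamp]
    · rw [if_neg hamp, if_neg hamp]
      by_cases h2 : PySem.Chars.endswith l ['&', '&'] = true
      · rw [if_pos h2, if_pos h2]
      · rw [if_neg h2, if_neg h2]
        by_cases h1 : PySem.Chars.endswith l ['&'] = true
        · rw [if_pos h1, if_pos h1]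
        · rw [if_neg h1, if_neg h1]
          congr 1
          rw [List.attach_map_val]
          rw [List.filter_congr (q := fun a => !a.isEmpty)
            (by intro x _; cases x <;> simp)]
          apply List.map_congr_left
          intro p hp
          have hmem := List.mem_of_mem_filter hp
          have hpne : p ≠ [] := by
            have := List.of_mem_filter hp
            simpa [List.isEmpty_iff] using this
          have hnoamp : '&' ∉ p := by
            rw [splitOn_eq_pvSplit1] at hmem
            exact pvSplit1_not_mem '&' l p hmem
          have hnosemi : ';' ∉ p := by
            rw [splitOn_eq_pvSplit1] at hmem
            exact fun h => hl (pvSplit1_subset '&' l p hmem ';' h)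
          rw [pvA]
          rw [if_neg (by simpa [List.length_eq_zero_iff] using hpne)]
          rw [if_neg (by have := find_neg_of_not_mem ';' p hnosemi; omega)]
          rw [if_pos (find_neg_of_not_mem '&' p hnoamp)]

theorem pvA_eq_pvB (l : List Char) :
    pvA l = PySem.Chars.join [';'] ((PySem.Chars.splitOn l [';']).map pvSeg) := by
  by_cases hsemi : ';' ∈ l
  · rw [pvA]
    have hne : ¬ l.length = 0 := by
      intro h
      rw [List.eq_nil_of_length_eq_zero h] at hsemi
      simp at hsemi
    rw [if_neg hne, if_pos (find_nonneg_of_mem ';' l hsemi)]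
    congr 1
    rw [List.attach_map_val]
    apply List.map_congr_left
    intro p hp
    rw [splitOn_eq_pvSplit1] at hp
    exact pvA_eq_pvSeg p (pvSplit1_not_mem ';' l p hp)
  · rw [splitOn_eq_pvSplit1, pvSplit1_of_not_mem ';' l hsemi]
    simp only [List.map_cons, List.map_nil, PySem.Chars.join_singleton]
    exact pvA_eq_pvSeg l hsemi

-- ===== VERDICT (by name: the statement is the Claim_ definition above) =====
theorem convert_antenna_spec_autocorr_spec : Claim_equal_convert_antenna_spec_autocorr := by
  intro antenna _
  unfold Spec_convert_antenna_spec_autocorr convert_antenna_spec_autocorr convert_antenna_spec_autocorr_alt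
  exact congrArg String.ofList (pvA_eq_pvB antenna.toList)
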